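-- pv_equiv track=rewrite | github.com/eliottcassidy2000/math | 04-computation/moment_hierarchy_n9.py | count_9_cycles_dp
-- ===== SOURCE A (Python) =====
-- def count_9_cycles_dp(A, n):
--     """Count 9-cycles = Hamiltonian cycles."""
--     dp = [[0]*n for _ in range(1 << n)]
--     dp[1][0] = 1
--     for mask in range(1, 1 << n):
--         for v in range(n):
--             if not (mask & (1 << v)) or dp[mask][v] == 0: continue
--             for u in range(n):
--                 if mask & (1 << u): continue
--                 if A[v][u]:
--                     dp[mask | (1 << u)][u] += dp[mask][v]
--     full = (1 << n) - 1
--     return sum(dp[full][v] for v in range(1, n) if A[v][0]) // n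
-- ===== SOURCE B (Python) =====
-- def count_9_cycles_dp(A, n):
--     """Count 9-cycles = Hamiltonian cycles."""
--     memo = {}
--
--     def f(mask, v):
--         # number of simple paths from vertex 0 to v visiting exactly `mask`
--         if not (mask & (1 << v)):
--             return 0
--         if mask == (1 << v):
--             return 1 if v == 0 else 0
--         if (mask, v) in memo:
--             return memo[(mask, v)]
--         rest = mask ^ (1 << v)
--         total = 0
--         for u in range(n):
--             if (rest & (1 << u)) and A[u][v]:
--                 total += f(rest, u)
--         memo[(mask, v)] = total
--         return total
--
--     full = (1 << n) - 1
--     return sum(f(full, v) for v in range(1, n) if A[v][0]) // n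
-- ===== Notes on version B (the rewrite author's own statement) =====
-- stated objective: alternative
-- what changed: replaces the bottom-up push DP that fills the whole 2^n x n table in mask order by a top-down memoized recursion f(mask,v) with the pull relation f(mask,v)=sum of f(mask\{v},u) over in-neighbours u, caching only reachable states in a dict
-- outside the precondition, e.g. on count_9_cycles_dp([[0, 0, 1], [1, 0], [1, 1, 0]], 3): A returns 0, B raises IndexError
import Mathlib
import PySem

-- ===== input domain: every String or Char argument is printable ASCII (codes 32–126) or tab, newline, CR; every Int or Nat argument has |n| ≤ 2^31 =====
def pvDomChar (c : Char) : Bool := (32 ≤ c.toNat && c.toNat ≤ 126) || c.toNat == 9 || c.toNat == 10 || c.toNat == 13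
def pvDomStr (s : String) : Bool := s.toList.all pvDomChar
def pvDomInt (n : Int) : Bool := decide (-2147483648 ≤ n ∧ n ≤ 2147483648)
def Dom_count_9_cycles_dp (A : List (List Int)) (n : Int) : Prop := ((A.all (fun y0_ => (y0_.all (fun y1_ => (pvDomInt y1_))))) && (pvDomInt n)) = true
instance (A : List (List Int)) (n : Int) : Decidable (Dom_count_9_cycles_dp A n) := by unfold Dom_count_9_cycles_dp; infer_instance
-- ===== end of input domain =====

-- B replaces A's bottom-up push DP over the full 2^n × n table by a top-down memoized
-- recursion on subsets (pull relation, dict cache); return value only, no argument is mutated.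

-- shared 2-level indexing helpers (Python's xs[i][j] reads / writes; exact on in-range indices,
-- which Pre_ guarantees for every access either program performs)
def get2 (T : List (List Int)) (i j : Nat) : Int := (T.getD i []).getD j 0
def set2 (T : List (List Int)) (i j : Nat) (x : Int) : List (List Int) :=
  T.set i ((T.getD i []).set j x)

-- termination lemma for the B-side recursion (clearing a set bit decreases the mask)
theorem pv_xor_lt (mask v : Nat) (h : mask.testBit v = true) : mask ^^^ (1 <<< v) < mask := by
  have h2 : (1 <<< v) = 2 ^ v := Nat.one_shiftLeft v
  rw [h2]
  apply Nat.lt_of_testBit v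
  · simp [Nat.testBit_xor, h, Nat.testBit_two_pow]
  · exact h
  · intro j hj
    have hne : v ≠ j := by omega
    simp [Nat.testBit_xor, Nat.testBit_two_pow, hne]

-- ===== PORT A =====
def aInner (A : List (List Int)) (mask v : Nat) (dp : List (List Int)) (u : Nat) : List (List Int) :=
  if mask.testBit u then dp
  else if get2 A v u ≠ 0 then
    set2 dp (mask ||| (1 <<< u)) u (get2 dp (mask ||| (1 <<< u)) u + get2 dp mask v)
  else dp

def aStep (A : List (List Int)) (nn : Nat) (dp : List (List Int)) (mask : Nat) : List (List Int) :=
  (List.range nn).foldl (fun dp v =>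
    if ¬ mask.testBit v ∨ get2 dp mask v = 0 then dp
    else (List.range nn).foldl (aInner A mask v) dp) dp

def count_9_cycles_dp (A : List (List Int)) (n : Int) : Int :=
  let nn := n.toNat
  let dp0 := List.replicate (2 ^ nn) (List.replicate nn (0 : Int))
  let dp1 := set2 dp0 1 0 1
  let dp := ((List.range (2 ^ nn)).drop 1).foldl (aStep A nn) dp1
  let full := 2 ^ nn - 1
  PySem.Int.floordiv
    (((List.range nn).drop 1).foldl
      (fun s v => if get2 A v 0 ≠ 0 then s + get2 dp full v else s) 0) n

-- ===== PORT B =====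
mutual
def fB (A : List (List Int)) (nn : Nat) (memo : PySem.Dict (Nat × Nat) Int)
    (mask v : Nat) : Int × PySem.Dict (Nat × Nat) Int :=
  if hv : ¬ (mask.testBit v = true) then (0, memo)
  else if mask = 1 <<< v then ((if v = 0 then 1 else 0), memo)
  else
    match memo.get? (mask, v) with
    | some x => (x, memo)
    | none =>
      let p := gB A nn memo (mask ^^^ (1 <<< v)) v (List.range nn)
      (p.1, p.2.insert (mask, v) p.1)
termination_by (mask, 0, 0)
decreasing_by
  exact Prod.Lex.left _ _ (pv_xor_lt _ _ (by simpa using hv))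

def gB (A : List (List Int)) (nn : Nat) (memo : PySem.Dict (Nat × Nat) Int)
    (rest v : Nat) (us : List Nat) : Int × PySem.Dict (Nat × Nat) Int :=
  match us with
  | [] => (0, memo)
  | u :: us' =>
    if rest.testBit u ∧ get2 A u v ≠ 0 then
      let p := fB A nn memo rest u
      let q := gB A nn p.2 rest v us'
      (p.1 + q.1, q.2)
    else gB A nn memo rest v us'
termination_by (rest, 1, us.length)
decreasing_by
  · exact Prod.Lex.right _ (Prod.Lex.left _ _ (by omega))
  · exact Prod.Lex.right _ (Prod.Lex.right _ (by simp))
  · exact Prod.Lex.right _ (Prod.Lex.right _ (by simp))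
end

def count_9_cycles_dp_alt (A : List (List Int)) (n : Int) : Int :=
  let nn := n.toNat
  let full := 2 ^ nn - 1
  PySem.Int.floordiv
    (((List.range nn).drop 1).foldl
      (fun (p : Int × PySem.Dict (Nat × Nat) Int) v =>
        if get2 A v 0 ≠ 0 then
          let q := fB A nn p.2 full v
          (p.1 + q.1, q.2)
        else p)
      (0, PySem.Dict.empty)).1 n

-- ===== PRECONDITION & SPEC =====
-- Pre_ excludes n < 1 and matrices smaller or more ragged than n×n: there A raises
-- IndexError/ValueError on most inputs, and on the rest (short rows its zero-count guards
-- happen to skip) B's pull-order reads raise where A's push-order reads do not.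
def Pre_count_9_cycles_dp (A : List (List Int)) (n : Int) : Prop :=
  1 ≤ n ∧ n.toNat ≤ A.length ∧ ∀ row ∈ A.take n.toNat, n.toNat ≤ row.length
instance (A : List (List Int)) (n : Int) : Decidable (Pre_count_9_cycles_dp A n) := by
  unfold Pre_count_9_cycles_dp; infer_instance

def pvWitness_count_9_cycles_dp : List (List Int) × Int := ([[0, 1], [1, 0]], 2)

def Spec_count_9_cycles_dp (A : List (List Int)) (n : Int) (out : Int) : Prop := out = count_9_cycles_dp_alt A n
instance (A : List (List Int)) (n : Int) (out : Int) : Decidable (Spec_count_9_cycles_dp A n out) := by unfold Spec_count_9_cycles_dp; infer_instance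

-- ===== CLAIM (what is proved, stated in full; the proofs are below) =====
def Claim_equal_count_9_cycles_dp : Prop := ∀ (A : List (List Int)) (n : Int), Dom_count_9_cycles_dp A n → Pre_count_9_cycles_dp A n → Spec_count_9_cycles_dp A n (count_9_cycles_dp A n)

-- ===== LEMMAS AND PROOFS =====

-- the common mathematical value: F A nn mask v = number of simple paths from 0 to v
-- visiting exactly the vertices of `mask` (weighted by nothing; edges = nonzero entries)
def F (A : List (List Int)) (nn mask v : Nat) : Int :=
  if hv : ¬ (mask.testBit v = true) then 0
  else if mask = 1 <<< v then (if v = 0 then 1 else 0)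
  else
    ((List.range nn).map (fun u =>
      if (mask ^^^ (1 <<< v)).testBit u = true ∧ get2 A u v ≠ 0
      then F A nn (mask ^^^ (1 <<< v)) u else 0)).sum
termination_by mask
decreasing_by
  exact pv_xor_lt _ _ (by simpa using hv)

-- ---------- bit lemmas ----------
theorem pv_rest_iff (K mask v : Nat) :
    (mask.testBit v = true ∧ mask ^^^ (1 <<< v) = K) ↔ (K.testBit v = false ∧ mask = K ||| (1 <<< v)) := by
  rw [Nat.one_shiftLeft]
  constructor
  · rintro ⟨h1, h2⟩
    subst h2
    constructor
    · simp [Nat.testBit_xor, h1, Nat.testBit_two_pow]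
    · apply Nat.eq_of_testBit_eq
      intro i
      by_cases hiv : i = v
      · subst hiv; simp [Nat.testBit_or, Nat.testBit_xor, h1, Nat.testBit_two_pow]
      · simp [Nat.testBit_or, Nat.testBit_xor, Nat.testBit_two_pow, Ne.symm hiv]
  · rintro ⟨h1, h2⟩
    subst h2
    constructor
    · simp [Nat.testBit_or, Nat.testBit_two_pow]
    · apply Nat.eq_of_testBit_eq
      intro i
      by_cases hiv : i = v
      · subst hiv; simp [Nat.testBit_xor, Nat.testBit_or, h1, Nat.testBit_two_pow]
      · simp [Nat.testBit_xor, Nat.testBit_or, Nat.testBit_two_pow, Ne.symm hiv]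

theorem pv_or_testBit_self (K u : Nat) : (K ||| 1 <<< u).testBit u = true := by
  simp [Nat.one_shiftLeft, Nat.testBit_or, Nat.testBit_two_pow]

theorem pv_or_ne (K u : Nat) (h : K.testBit u = false) : K ||| 1 <<< u ≠ K := by
  intro he
  have := pv_or_testBit_self K u
  rw [he, h] at this
  exact Bool.false_ne_true this

theorem pv_or_lt_pow (K u nn : Nat) (hK : K < 2 ^ nn) (hu : u < nn) : K ||| 1 <<< u < 2 ^ nn := by
  have h2 : (1 <<< u) = 2 ^ u := Nat.one_shiftLeft u
  have : 2 ^ u < 2 ^ nn := Nat.pow_lt_pow_right (by omega) hu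
  rw [h2]
  exact Nat.or_lt_two_pow hK this

theorem pv_xor_ne_zero (mask v : Nat) (h1 : mask.testBit v = true) (h2 : mask ≠ 1 <<< v) :
    mask ^^^ (1 <<< v) ≠ 0 := by
  intro he
  exact h2 (Nat.xor_eq_zero_iff.mp he)

-- ---------- table (get2/set2) lemmas ----------
def shapeT (nn : Nat) (T : List (List Int)) : Prop :=
  T.length = 2 ^ nn ∧ ∀ row ∈ T, row.length = nn

theorem pv_row_len (nn : Nat) (T : List (List Int)) (h : shapeT nn T) (i : Nat) (hi : i < 2 ^ nn) :
    (T.getD i []).length = nn := by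
  have hlen : i < T.length := by rw [h.1]; exact hi
  rw [List.getD_eq_getElem _ _ hlen]
  exact h.2 _ (List.getElem_mem hlen)

theorem pv_shape_set2 (nn : Nat) (T : List (List Int)) (h : shapeT nn T) (i j : Nat) (x : Int) :
    shapeT nn (set2 T i j x) := by
  by_cases hi : i < T.length
  · constructor
    · simp [set2, h.1]
    · intro row hrow
      rcases List.mem_or_eq_of_mem_set hrow with h1 | h1
      · exact h.2 _ h1
      · subst h1
        rw [List.length_set, List.getD_eq_getElem _ _ hi]
        exact h.2 _ (List.getElem_mem hi)
  · have he : set2 T i j x = T := by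
      unfold set2
      exact List.set_eq_of_length_le (by omega)
    rw [he]; exact h

theorem getD_set_self (T : List (List Int)) (i : Nat) (r : List Int) (hi : i < T.length) :
    (T.set i r).getD i [] = r := by
  rw [List.getD_eq_getElem _ _ (by simpa using hi)]
  simp

theorem getD_set_ne (T : List (List Int)) (i i' : Nat) (r : List Int) (h : i ≠ i') :
    (T.set i r).getD i' [] = T.getD i' [] := by
  rw [List.getD_eq_getElem?_getD, List.getElem?_set_ne h, ← List.getD_eq_getElem?_getD]

theorem pv_get2_set2_self (T : List (List Int)) (i j : Nat) (x : Int)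
    (hi : i < T.length) (hj : j < (T.getD i []).length) :
    get2 (set2 T i j x) i j = x := by
  unfold get2 set2
  rw [getD_set_self _ _ _ hi]
  rw [List.getD_eq_getElem _ _ (by simpa using hj)]
  simp

theorem pv_get2_set2_ne (T : List (List Int)) (i j i' j' : Nat) (x : Int)
    (h : i ≠ i' ∨ j ≠ j') :
    get2 (set2 T i j x) i' j' = get2 T i' j' := by
  unfold get2 set2
  rcases h with h | h
  · rw [getD_set_ne _ _ _ _ h]
  · by_cases hii : i = i'
    · subst hii
      by_cases hi : i < T.length
      · rw [getD_set_self _ _ _ hi]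
        rw [List.getD_eq_getElem?_getD, List.getElem?_set_ne h, ← List.getD_eq_getElem?_getD]
      · rw [List.set_eq_of_length_le (by omega)]
    · rw [getD_set_ne _ _ _ _ hii]

theorem pv_get2_replicate (nn : Nat) (i j : Nat) :
    get2 (List.replicate (2 ^ nn) (List.replicate nn (0 : Int))) i j = 0 := by
  unfold get2
  by_cases hi : i < 2 ^ nn
  · have : (List.replicate (2 ^ nn) (List.replicate nn (0 : Int))).getD i [] = List.replicate nn (0 : Int) := by
      rw [List.getD_eq_getElem _ _ (by simpa using hi)]
      simp
    rw [this]
    by_cases hj : j < nn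
    · rw [List.getD_eq_getElem _ _ (by simpa using hj)]
      simp
    · rw [List.getD_eq_default _ _ (by simpa using (by omega : nn ≤ j))]
  · have houter : (List.replicate (2 ^ nn) (List.replicate nn (0 : Int))).getD i [] = [] :=
      List.getD_eq_default _ _ (by simpa using (by omega : 2 ^ nn ≤ i))
    rw [houter]
    simp

-- ---------- list sum helpers ----------
theorem pv_sum_map_add (l : List Nat) (f g : Nat → Int) :
    (l.map (fun w => f w + g w)).sum = (l.map f).sum + (l.map g).sum := by
  induction l with
  | nil => simp
  | cons a l ih => simp [ih]; ring

theorem pv_sum_map_zero (l : List Nat) : (l.map (fun _ => (0 : Int))).sum = 0 := by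
  simp

-- ---------- F equation lemmas ----------
theorem F_zero (A : List (List Int)) (nn mask v : Nat) (h : mask.testBit v = false) :
    F A nn mask v = 0 := by
  rw [F]
  simp [h]

theorem F_single (A : List (List Int)) (nn v : Nat) :
    F A nn (1 <<< v) v = if v = 0 then 1 else 0 := by
  rw [F]
  simp [Nat.one_shiftLeft]

theorem F_rec (A : List (List Int)) (nn mask v : Nat)
    (h1 : mask.testBit v = true) (h2 : mask ≠ 1 <<< v) :
    F A nn mask v = ((List.range nn).map (fun u =>
      if (mask ^^^ (1 <<< v)).testBit u = true ∧ get2 A u v ≠ 0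
      then F A nn (mask ^^^ (1 <<< v)) u else 0)).sum := by
  rw [F]
  simp [h1, h2]

-- ---------- the loop invariant of A's mask sweep ----------
-- after all masks in [1, K) have been processed, every cell holds its initial value plus
-- the contributions received from the processed masks (which are already final F-values)
def InvT (A : List (List Int)) (nn K : Nat) (T : List (List Int)) : Prop :=
  ∀ mask v, mask < 2 ^ nn → v < nn →
    get2 T mask v = (if mask = 1 ∧ v = 0 then 1 else 0)
      + ((List.range nn).map (fun w =>
          if mask.testBit v = true ∧ (mask ^^^ (1 <<< v)).testBit w = true ∧
             1 ≤ mask ^^^ (1 <<< v) ∧ mask ^^^ (1 <<< v) < K ∧ get2 A w v ≠ 0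
          then F A nn (mask ^^^ (1 <<< v)) w else 0)).sum

theorem pv_settled (A : List (List Int)) (nn K : Nat) (T : List (List Int))
    (hInv : InvT A nn K T) (mask v : Nat) (hm : mask < 2 ^ nn) (hK : mask ≤ K) (hv : v < nn) :
    get2 T mask v = F A nn mask v := by
  rw [hInv mask v hm hv]
  by_cases h1 : mask.testBit v = true
  · by_cases h2 : mask = 1 <<< v
    · subst h2
      rw [F_single]
      have hbase : ((1 <<< v) = 1 ∧ v = 0) ↔ v = 0 := by
        constructor
        · rintro ⟨_, h⟩; exact h
        · intro h; subst h; exact ⟨rfl, rfl⟩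
      have hzero : ∀ w ∈ List.range nn,
          (if (1 <<< v).testBit v = true ∧ ((1 <<< v) ^^^ (1 <<< v)).testBit w = true ∧
             1 ≤ (1 <<< v) ^^^ (1 <<< v) ∧ (1 <<< v) ^^^ (1 <<< v) < K ∧ get2 A w v ≠ 0
          then F A nn ((1 <<< v) ^^^ (1 <<< v)) w else 0) = (0 : Int) := by
        intro w _
        rw [if_neg]
        rintro ⟨_, _, hle, _, _⟩
        rw [Nat.xor_self] at hle
        omega
      rw [List.map_congr_left hzero, pv_sum_map_zero]
      rw [if_congr hbase rfl rfl]
      split_ifs <;> omega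
    · rw [F_rec _ _ _ _ h1 h2]
      have hrlt : mask ^^^ (1 <<< v) < mask := pv_xor_lt _ _ h1
      have hrne : mask ^^^ (1 <<< v) ≠ 0 := pv_xor_ne_zero _ _ h1 h2
      have hbase : ¬ (mask = 1 ∧ v = 0) := by
        rintro ⟨e1, e2⟩
        subst e1; subst e2
        exact h2 rfl
      rw [if_neg hbase]
      have hcongr : ∀ w ∈ List.range nn,
          (if mask.testBit v = true ∧ (mask ^^^ (1 <<< v)).testBit w = true ∧
             1 ≤ mask ^^^ (1 <<< v) ∧ mask ^^^ (1 <<< v) < K ∧ get2 A w v ≠ 0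
          then F A nn (mask ^^^ (1 <<< v)) w else 0)
          = (if (mask ^^^ (1 <<< v)).testBit w = true ∧ get2 A w v ≠ 0
             then F A nn (mask ^^^ (1 <<< v)) w else 0) := by
        intro w _
        apply if_congr _ rfl rfl
        constructor
        · rintro ⟨_, hb, _, _, he⟩; exact ⟨hb, he⟩
        · rintro ⟨hb, he⟩; exact ⟨h1, hb, by omega, by omega, he⟩
      rw [List.map_congr_left hcongr]
      omega
  · rw [F_zero _ _ _ _ (by simpa using h1)]
    have hbase : ¬ (mask = 1 ∧ v = 0) := by
      rintro ⟨e1, e2⟩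
      subst e1; subst e2
      simp at h1
    have hzero : ∀ w ∈ List.range nn,
        (if mask.testBit v = true ∧ (mask ^^^ (1 <<< v)).testBit w = true ∧
           1 ≤ mask ^^^ (1 <<< v) ∧ mask ^^^ (1 <<< v) < K ∧ get2 A w v ≠ 0
        then F A nn (mask ^^^ (1 <<< v)) w else 0) = (0 : Int) := by
      intro w _
      rw [if_neg]
      rintro ⟨hb, _⟩
      exact h1 hb
    rw [if_neg hbase, List.map_congr_left hzero, pv_sum_map_zero]
    omega

-- ---------- effect of A's inner u-loop ----------
theorem pv_inner (A : List (List Int)) (nn K w : Nat) (hK : K < 2 ^ nn) :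
    ∀ (us : List Nat) (T : List (List Int)), shapeT nn T → us.Nodup → (∀ u ∈ us, u < nn) →
      shapeT nn (us.foldl (aInner A K w) T) ∧
      (∀ j, get2 (us.foldl (aInner A K w) T) K j = get2 T K j) ∧
      (∀ mask v, mask < 2 ^ nn → v < nn →
        get2 (us.foldl (aInner A K w) T) mask v =
          get2 T mask v + (if v ∈ us ∧ K.testBit v = false ∧ get2 A w v ≠ 0 ∧ mask = K ||| 1 <<< v
                           then get2 T K w else 0)) := by
  intro us
  induction us with
  | nil =>
    intro T hsh _ _
    refine ⟨hsh, fun j => rfl, fun mask v _ _ => ?_⟩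
    simp
  | cons u us' ih =>
    intro T hsh hnd hlt
    have hu : u < nn := hlt u (by simp)
    have hnd' : us'.Nodup := (List.nodup_cons.mp hnd).2
    have hnus' : u ∉ us' := (List.nodup_cons.mp hnd).1
    have hlt' : ∀ x ∈ us', x < nn := fun x hx => hlt x (by simp [hx])
    by_cases hb : K.testBit u = true
    · -- vertex u already in mask: no write
      have hT1 : aInner A K w T u = T := by
        unfold aInner
        rw [if_pos hb]
      rw [List.foldl_cons, hT1]
      obtain ⟨s1, s2, s3⟩ := ih T hsh hnd' hlt'
      refine ⟨s1, s2, fun mask v hm hv => ?_⟩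
      rw [s3 mask v hm hv]
      congr 1
      apply if_congr _ rfl rfl
      constructor
      · rintro ⟨h1, h2, h3, h4⟩
        refine ⟨by simp [h1], h2, h3, h4⟩
      · rintro ⟨h1, h2, h3, h4⟩
        rcases List.mem_cons.mp h1 with he | he
        · subst he; rw [hb] at h2; exact absurd h2 (by simp)
        · exact ⟨he, h2, h3, h4⟩
    · have hbf : K.testBit u = false := by simpa using hb
      by_cases he : get2 A w u ≠ 0
      · -- write: dp[K|1<<u][u] += dp[K][w]
        set tgt := K ||| 1 <<< u with htgt
        have htlt : tgt < 2 ^ nn := pv_or_lt_pow K u nn hK hu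
        have htne : tgt ≠ K := pv_or_ne K u hbf
        have hT1 : aInner A K w T u = set2 T tgt u (get2 T tgt u + get2 T K w) := by
          unfold aInner
          rw [if_neg (by simp [hbf]), if_pos he]
        set T1 := set2 T tgt u (get2 T tgt u + get2 T K w) with hT1d
        have hsh1 : shapeT nn T1 := pv_shape_set2 nn T hsh tgt u _
        have hrowK : ∀ j, get2 T1 K j = get2 T K j := fun j =>
          pv_get2_set2_ne T tgt u K j _ (Or.inl htne)
        have hcell : ∀ mask v, mask < 2 ^ nn → v < nn →
            get2 T1 mask v = get2 T mask v +
              (if v = u ∧ mask = tgt then get2 T K w else 0) := by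
          intro mask v hm hv
          by_cases hc : v = u ∧ mask = tgt
          · obtain ⟨hc1, hc2⟩ := hc
            subst hc1; subst hc2
            rw [pv_get2_set2_self T tgt v _ (by rw [hsh.1]; exact htlt)
                (by rw [pv_row_len nn T hsh tgt htlt]; exact hv)]
            simp
          · rw [pv_get2_set2_ne T tgt u mask v _ ?_, if_neg hc]
            · simp
            · by_cases h1 : v = u
              · subst h1
                left
                intro hteq
                exact hc ⟨rfl, hteq.symm⟩
              · right; exact fun hx => h1 hx.symm
        rw [List.foldl_cons, hT1]
        obtain ⟨s1, s2, s3⟩ := ih T1 hsh1 hnd' hlt'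
        refine ⟨s1, fun j => (s2 j).trans (hrowK j), fun mask v hm hv => ?_⟩
        rw [s3 mask v hm hv, hcell mask v hm hv, hrowK w]
        by_cases h1 : v = u
        · have e2 : (if v ∈ us' ∧ K.testBit v = false ∧ get2 A w v ≠ 0 ∧ mask = K ||| 1 <<< v
              then get2 T K w else 0) = 0 := by
            rw [if_neg]
            rintro ⟨hx, _⟩
            exact hnus' (h1 ▸ hx)
          rw [e2]
          by_cases h3 : mask = tgt
          · rw [if_pos ⟨h1, h3⟩, if_pos ⟨by simp [h1], by rw [h1]; exact hbf,
              by rw [h1]; exact he, by rw [h1]; exact h3⟩]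
            ring
          · rw [if_neg (by rintro ⟨_, hx⟩; exact h3 hx),
              if_neg (by rintro ⟨_, _, _, hx⟩; rw [h1] at hx; exact h3 hx)]
            ring
        · rw [if_neg (by rintro ⟨hx, _⟩; exact h1 hx)]
          have hmem : (v ∈ us' ∧ K.testBit v = false ∧ get2 A w v ≠ 0 ∧ mask = K ||| 1 <<< v)
              ↔ (v ∈ u :: us' ∧ K.testBit v = false ∧ get2 A w v ≠ 0 ∧ mask = K ||| 1 <<< v) := by
            constructor
            · rintro ⟨hx, h2, h3, h4⟩
              exact ⟨by simp [hx], h2, h3, h4⟩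
            · rintro ⟨hx, h2, h3, h4⟩
              rcases List.mem_cons.mp hx with h5 | h5
              · exact absurd h5 h1
              · exact ⟨h5, h2, h3, h4⟩
          rw [if_congr hmem rfl rfl]
          ring
      · -- no edge: no write
        have hT1 : aInner A K w T u = T := by
          unfold aInner
          rw [if_neg (by simp [hbf]), if_neg he]
        rw [List.foldl_cons, hT1]
        obtain ⟨s1, s2, s3⟩ := ih T hsh hnd' hlt'
        refine ⟨s1, s2, fun mask v hm hv => ?_⟩
        rw [s3 mask v hm hv]
        congr 1
        apply if_congr _ rfl rfl
        constructor
        · rintro ⟨h1, h2, h3, h4⟩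
          exact ⟨by simp [h1], h2, h3, h4⟩
        · rintro ⟨h1, h2, h3, h4⟩
          rcases List.mem_cons.mp h1 with h5 | h5
          · subst h5; exact absurd h3 he
          · exact ⟨h5, h2, h3, h4⟩

-- ---------- effect of A's v-loop (one whole mask step) ----------
theorem pv_outer (A : List (List Int)) (nn K : Nat) (hK : K < 2 ^ nn) :
    ∀ (vs : List Nat) (T : List (List Int)), shapeT nn T → (∀ x ∈ vs, x < nn) →
      shapeT nn (vs.foldl (fun dp v =>
          if ¬ K.testBit v ∨ get2 dp K v = 0 then dp
          else (List.range nn).foldl (aInner A K v) dp) T) ∧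
      (∀ j, get2 (vs.foldl (fun dp v =>
          if ¬ K.testBit v ∨ get2 dp K v = 0 then dp
          else (List.range nn).foldl (aInner A K v) dp) T) K j = get2 T K j) ∧
      (∀ mask v, mask < 2 ^ nn → v < nn →
        get2 (vs.foldl (fun dp v =>
            if ¬ K.testBit v ∨ get2 dp K v = 0 then dp
            else (List.range nn).foldl (aInner A K v) dp) T) mask v =
          get2 T mask v +
            (vs.map (fun w =>
              if K.testBit w = true ∧ get2 A w v ≠ 0 ∧ K.testBit v = false ∧ mask = K ||| 1 <<< v
              then get2 T K w else 0)).sum) := by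
  intro vs
  induction vs with
  | nil =>
    intro T hsh _
    refine ⟨hsh, fun j => rfl, fun mask v _ _ => ?_⟩
    simp
  | cons w vs' ih =>
    intro T hsh hlt
    have hw : w < nn := hlt w (by simp)
    have hlt' : ∀ x ∈ vs', x < nn := fun x hx => hlt x (by simp [hx])
    rw [List.foldl_cons]
    by_cases hg : ¬ K.testBit w ∨ get2 T K w = 0
    · rw [if_pos hg]
      obtain ⟨s1, s2, s3⟩ := ih T hsh hlt'
      refine ⟨s1, s2, fun mask v hm hv => ?_⟩
      rw [s3 mask v hm hv, List.map_cons, List.sum_cons]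
      have hhead : (if K.testBit w = true ∧ get2 A w v ≠ 0 ∧ K.testBit v = false ∧
          mask = K ||| 1 <<< v then get2 T K w else 0) = 0 := by
        rcases hg with hg | hg
        · rw [if_neg]
          rintro ⟨hx, _⟩
          exact hg (by simp [hx])
        · split_ifs <;> simp [hg]
      rw [hhead]
      ring
    · rw [if_neg hg]
      have hg1 : K.testBit w = true := by
        by_contra hx
        exact hg (Or.inl hx)
      obtain ⟨i1, i2, i3⟩ := pv_inner A nn K w hK (List.range nn) T hsh
        List.nodup_range (fun x hx => List.mem_range.mp hx)
      obtain ⟨s1, s2, s3⟩ := ih _ i1 hlt'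
      refine ⟨s1, fun j => (s2 j).trans (i2 j), fun mask v hm hv => ?_⟩
      rw [s3 mask v hm hv, i3 mask v hm hv, List.map_cons, List.sum_cons]
      have hsum : (vs'.map (fun w' =>
            if K.testBit w' = true ∧ get2 A w' v ≠ 0 ∧ K.testBit v = false ∧
               mask = K ||| 1 <<< v
            then get2 ((List.range nn).foldl (aInner A K w) T) K w' else 0)).sum
          = (vs'.map (fun w' =>
            if K.testBit w' = true ∧ get2 A w' v ≠ 0 ∧ K.testBit v = false ∧
               mask = K ||| 1 <<< v
            then get2 T K w' else 0)).sum := by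
        congr 1
        apply List.map_congr_left
        intro x _
        rw [i2 x]
      rw [hsum]
      have hhead : (if v ∈ List.range nn ∧ K.testBit v = false ∧ get2 A w v ≠ 0 ∧
            mask = K ||| 1 <<< v then get2 T K w else 0)
          = (if K.testBit w = true ∧ get2 A w v ≠ 0 ∧ K.testBit v = false ∧
            mask = K ||| 1 <<< v then get2 T K w else 0) := by
        apply if_congr _ rfl rfl
        constructor
        · rintro ⟨_, h2, h3, h4⟩
          exact ⟨hg1, h3, h2, h4⟩
        · rintro ⟨_, h2, h3, h4⟩
          exact ⟨List.mem_range.mpr hv, h3, h2, h4⟩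
      rw [hhead]
      ring

-- ---------- one mask step preserves the invariant ----------
theorem pv_step (A : List (List Int)) (nn K : Nat) (T : List (List Int))
    (hsh : shapeT nn T) (hInv : InvT A nn K T) (hK1 : 1 ≤ K) (hK : K < 2 ^ nn) :
    shapeT nn (aStep A nn T K) ∧ InvT A nn (K + 1) (aStep A nn T K) := by
  obtain ⟨s1, _, s3⟩ := pv_outer A nn K hK (List.range nn) T hsh (fun x hx => List.mem_range.mp hx)
  unfold aStep
  refine ⟨s1, fun mask v hm hv => ?_⟩
  rw [s3 mask v hm hv, hInv mask v hm hv]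
  have hset : ∀ w ∈ List.range nn,
      (if K.testBit w = true ∧ get2 A w v ≠ 0 ∧ K.testBit v = false ∧ mask = K ||| 1 <<< v
       then get2 T K w else 0)
      = (if K.testBit w = true ∧ get2 A w v ≠ 0 ∧ K.testBit v = false ∧ mask = K ||| 1 <<< v
       then F A nn K w else 0) := by
    intro w hw
    rw [pv_settled A nn K T hInv K w hK (le_refl K) (List.mem_range.mp hw)]
  rw [List.map_congr_left hset]
  have hpt : ∀ w ∈ List.range nn,
      (if mask.testBit v = true ∧ (mask ^^^ (1 <<< v)).testBit w = true ∧
          1 ≤ mask ^^^ (1 <<< v) ∧ mask ^^^ (1 <<< v) < K + 1 ∧ get2 A w v ≠ 0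
       then F A nn (mask ^^^ (1 <<< v)) w else 0)
      = (if mask.testBit v = true ∧ (mask ^^^ (1 <<< v)).testBit w = true ∧
          1 ≤ mask ^^^ (1 <<< v) ∧ mask ^^^ (1 <<< v) < K ∧ get2 A w v ≠ 0
       then F A nn (mask ^^^ (1 <<< v)) w else 0)
      + (if K.testBit w = true ∧ get2 A w v ≠ 0 ∧ K.testBit v = false ∧ mask = K ||| 1 <<< v
       then F A nn K w else 0) := by
    intro w _
    by_cases hc : mask.testBit v = true ∧ (mask ^^^ (1 <<< v)).testBit w = true ∧
        1 ≤ mask ^^^ (1 <<< v) ∧ mask ^^^ (1 <<< v) < K + 1 ∧ get2 A w v ≠ 0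
    · obtain ⟨c1, c2, c3, c4, c5⟩ := hc
      rw [if_pos ⟨c1, c2, c3, c4, c5⟩]
      by_cases hr : mask ^^^ (1 <<< v) < K
      · rw [if_pos ⟨c1, c2, c3, hr, c5⟩, if_neg]
        · ring
        · rintro ⟨_, _, d3, d4⟩
          have := ((pv_rest_iff K mask v).mpr ⟨d3, d4⟩).2
          omega
      · have hrK : mask ^^^ (1 <<< v) = K := by omega
        obtain ⟨e1, e2⟩ := (pv_rest_iff K mask v).mp ⟨c1, hrK⟩
        rw [if_neg (by rintro ⟨_, _, _, h4, _⟩; omega),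
          if_pos ⟨by rw [← hrK]; exact c2, c5, e1, e2⟩, hrK]
        ring
    · rw [if_neg hc, if_neg, if_neg]
      · ring
      · rintro ⟨d1, d2, d3, d4⟩
        obtain ⟨e1, e2⟩ := (pv_rest_iff K mask v).mpr ⟨d3, d4⟩
        exact hc ⟨e1, by rw [e2]; exact d1, by omega, by omega, d2⟩
      · rintro ⟨h1, h2, h3, h4, h5⟩
        exact hc ⟨h1, h2, h3, by omega, h5⟩
  rw [List.map_congr_left hpt, pv_sum_map_add]
  ring

-- ---------- the initial table ----------
theorem pv_init (A : List (List Int)) (nn : Nat) (hnn : 1 ≤ nn) :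
    shapeT nn (set2 (List.replicate (2 ^ nn) (List.replicate nn (0 : Int))) 1 0 1) ∧
    InvT A nn 1 (set2 (List.replicate (2 ^ nn) (List.replicate nn (0 : Int))) 1 0 1) := by
  have h2 : 2 ≤ 2 ^ nn := by
    calc 2 = 2 ^ 1 := rfl
    _ ≤ 2 ^ nn := Nat.pow_le_pow_right (by omega) hnn
  have hsh0 : shapeT nn (List.replicate (2 ^ nn) (List.replicate nn (0 : Int))) := by
    constructor
    · simp
    · intro row hrow
      rw [List.eq_of_mem_replicate hrow]
      simp
  constructor
  · exact pv_shape_set2 nn _ hsh0 1 0 1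
  · intro mask v hm hv
    have hzero : ∀ w ∈ List.range nn,
        (if mask.testBit v = true ∧ (mask ^^^ (1 <<< v)).testBit w = true ∧
           1 ≤ mask ^^^ (1 <<< v) ∧ mask ^^^ (1 <<< v) < 1 ∧ get2 A w v ≠ 0
        then F A nn (mask ^^^ (1 <<< v)) w else 0) = (0 : Int) := by
      intro w _
      rw [if_neg]
      rintro ⟨_, _, h3, h4, _⟩
      omega
    rw [List.map_congr_left hzero, pv_sum_map_zero]
    by_cases hc : mask = 1 ∧ v = 0
    · obtain ⟨hc1, hc2⟩ := hc
      subst hc1; subst hc2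
      rw [if_pos ⟨rfl, rfl⟩]
      rw [pv_get2_set2_self _ _ _ _ (by simp; omega)
        (by rw [pv_row_len nn _ hsh0 1 (by omega)]; omega)]
      omega
    · rw [if_neg hc]
      have hne : (1 : Nat) ≠ mask ∨ (0 : Nat) ≠ v := by
        by_cases h1 : mask = 1
        · right
          intro h0
          exact hc ⟨h1, h0.symm⟩
        · left
          exact fun h => h1 h.symm
      rw [pv_get2_set2_ne _ _ _ _ _ _ hne, pv_get2_replicate]
      omega

-- ---------- sweeping all masks 1 .. 2^nn - 1 ----------
theorem pv_sweep (A : List (List Int)) (nn : Nat) :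
    ∀ (c s : Nat) (T : List (List Int)), 1 ≤ s → s + c ≤ 2 ^ nn → shapeT nn T → InvT A nn s T →
      shapeT nn ((List.range' s c).foldl (aStep A nn) T) ∧
      InvT A nn (s + c) ((List.range' s c).foldl (aStep A nn) T) := by
  intro c
  induction c with
  | zero =>
    intro s T _ _ hsh hInv
    simpa using ⟨hsh, hInv⟩
  | succ c ih =>
    intro s T hs hsc hsh hInv
    rw [List.range'_succ, List.foldl_cons]
    obtain ⟨st1, st2⟩ := pv_step A nn s T hsh hInv hs (by omega)
    have := ih (s + 1) (aStep A nn T s) (by omega) (by omega) st1 st2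
    refine ⟨this.1, ?_⟩
    have heq : s + 1 + c = s + (c + 1) := by omega
    rw [← heq]
    exact this.2

-- ---------- A's port computes the F-sum ----------
theorem pv_fold_congr (A : List (List Int)) (f g : Nat → Int) :
    ∀ (l : List Nat) (s : Int), (∀ v ∈ l, f v = g v) →
      l.foldl (fun s v => if get2 A v 0 ≠ 0 then s + f v else s) s
        = l.foldl (fun s v => if get2 A v 0 ≠ 0 then s + g v else s) s := by
  intro l
  induction l with
  | nil => intro s _; rfl
  | cons a l ih =>
    intro s h
    rw [List.foldl_cons, List.foldl_cons, h a (by simp)]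
    exact ih _ (fun v hv => h v (by simp [hv]))

theorem pv_A_eq (A : List (List Int)) (n : Int) (h1 : 1 ≤ n) :
    count_9_cycles_dp A n = PySem.Int.floordiv
      (((List.range n.toNat).drop 1).foldl
        (fun s v => if get2 A v 0 ≠ 0 then s + F A n.toNat (2 ^ n.toNat - 1) v else s) 0) n := by
  have hnn : 1 ≤ n.toNat := by omega
  have h2 : 2 ≤ 2 ^ n.toNat := by
    calc 2 = 2 ^ 1 := rfl
    _ ≤ 2 ^ n.toNat := Nat.pow_le_pow_right (by omega) hnn
  have hdrop : (List.range (2 ^ n.toNat)).drop 1 = List.range' 1 (2 ^ n.toNat - 1) := by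
    conv_lhs => rw [show 2 ^ n.toNat = (2 ^ n.toNat - 1) + 1 by omega]
    rw [List.range_eq_range', List.range'_succ]
    rfl
  obtain ⟨ish, iInv⟩ := pv_init A n.toNat hnn
  obtain ⟨fsh, fInv⟩ := pv_sweep A n.toNat (2 ^ n.toNat - 1) 1 _ (le_refl 1) (by omega) ish iInv
  rw [show 1 + (2 ^ n.toNat - 1) = 2 ^ n.toNat by omega] at fInv
  unfold count_9_cycles_dp
  dsimp only
  rw [hdrop]
  congr 1
  apply pv_fold_congr
  intro v hv
  have hvn : v < n.toNat := List.mem_range.mp (List.mem_of_mem_drop hv)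
  exact pv_settled A n.toNat (2 ^ n.toNat) _ fInv (2 ^ n.toNat - 1) v (by omega) (by omega) hvn

-- ---------- B's port computes the same F-sum (memo-cache soundness) ----------
def MInv (A : List (List Int)) (nn : Nat) (memo : PySem.Dict (Nat × Nat) Int) : Prop :=
  ∀ mask v x, memo.get? (mask, v) = some x → x = F A nn mask v

theorem pv_gB (A : List (List Int)) (nn rest : Nat)
    (IH : ∀ v memo, MInv A nn memo →
      (fB A nn memo rest v).1 = F A nn rest v ∧ MInv A nn (fB A nn memo rest v).2) :
    ∀ (us : List Nat) (v : Nat) (memo : PySem.Dict (Nat × Nat) Int), MInv A nn memo →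
      (gB A nn memo rest v us).1
        = (us.map (fun u => if rest.testBit u = true ∧ get2 A u v ≠ 0
            then F A nn rest u else 0)).sum ∧
      MInv A nn (gB A nn memo rest v us).2 := by
  intro us
  induction us with
  | nil =>
    intro v memo hm
    rw [gB]
    simpa using hm
  | cons u us' ih =>
    intro v memo hm
    rw [gB]
    by_cases hc : rest.testBit u = true ∧ get2 A u v ≠ 0
    · obtain ⟨p1, p2⟩ := IH u memo hm
      obtain ⟨q1, q2⟩ := ih v (fB A nn memo rest u).2 p2
      simp only [if_pos hc]
      rw [List.map_cons, List.sum_cons, if_pos hc]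
      exact ⟨by rw [p1, q1], q2⟩
    · simp only [if_neg hc]
      obtain ⟨q1, q2⟩ := ih v memo hm
      rw [List.map_cons, List.sum_cons, if_neg hc, q1]
      exact ⟨by ring, q2⟩

theorem pv_fB (A : List (List Int)) (nn : Nat) :
    ∀ (mask : Nat) (v : Nat) (memo : PySem.Dict (Nat × Nat) Int), MInv A nn memo →
      (fB A nn memo mask v).1 = F A nn mask v ∧ MInv A nn (fB A nn memo mask v).2 := by
  intro mask
  induction mask using Nat.strong_induction_on with
  | _ mask SIH =>
    intro v memo hm
    by_cases hv : mask.testBit v = true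
    · by_cases h2 : mask = 1 <<< v
      · rw [fB, F]
        simp only [hv, h2]
        simpa using hm
      · rcases hg : memo.get? (mask, v) with _ | x
        · -- cache miss: run the u-loop on the reduced mask
          have IH' : ∀ v' memo', MInv A nn memo' →
              (fB A nn memo' (mask ^^^ (1 <<< v)) v').1 = F A nn (mask ^^^ (1 <<< v)) v' ∧
              MInv A nn (fB A nn memo' (mask ^^^ (1 <<< v)) v').2 :=
            fun v' memo' hm' => SIH _ (pv_xor_lt _ _ hv) v' memo' hm'
          obtain ⟨g1, g2⟩ := pv_gB A nn _ IH' (List.range nn) v memo hm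
          have hval : (fB A nn memo mask v)
              = ((gB A nn memo (mask ^^^ (1 <<< v)) v (List.range nn)).1,
                 (gB A nn memo (mask ^^^ (1 <<< v)) v (List.range nn)).2.insert (mask, v)
                   (gB A nn memo (mask ^^^ (1 <<< v)) v (List.range nn)).1) := by
            rw [fB]
            simp only [hv, h2, hg]
            simp
          rw [hval]
          have hF : (gB A nn memo (mask ^^^ (1 <<< v)) v (List.range nn)).1 = F A nn mask v := by
            rw [g1, F_rec A nn mask v hv h2]
          refine ⟨hF, ?_⟩
          intro mask' v' x hx
          rw [PySem.Dict.get?_insert] at hx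
          by_cases hk : (mask', v') = (mask, v)
          · rw [if_pos hk] at hx
            cases hx
            rw [hF]
            cases hk
            rfl
          · rw [if_neg hk] at hx
            exact g2 mask' v' x hx
        · -- cache hit
          have hval : fB A nn memo mask v = (x, memo) := by
            rw [fB]
            simp only [hv, h2, hg]
            simp
          rw [hval]
          exact ⟨(hm mask v x hg).symm ▸ rfl, hm⟩
    · rw [fB, F]
      simp only [hv]
      simpa using hm

theorem pv_B_fold (A : List (List Int)) (nn full : Nat) :
    ∀ (l : List Nat) (s : Int) (memo : PySem.Dict (Nat × Nat) Int), MInv A nn memo →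
      (l.foldl (fun (p : Int × PySem.Dict (Nat × Nat) Int) v =>
          if get2 A v 0 ≠ 0 then
            let q := fB A nn p.2 full v
            (p.1 + q.1, q.2)
          else p) (s, memo)).1
        = l.foldl (fun s v => if get2 A v 0 ≠ 0 then s + F A nn full v else s) s := by
  intro l
  induction l with
  | nil => intro s memo _; rfl
  | cons a l ih =>
    intro s memo hm
    rw [List.foldl_cons, List.foldl_cons]
    by_cases hc : get2 A a 0 ≠ 0
    · obtain ⟨f1, f2⟩ := pv_fB A nn full a memo hm
      simp only [if_pos hc]
      rw [← f1]
      exact ih _ _ f2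
    · simp only [if_neg hc]
      exact ih _ _ hm

theorem pv_B_eq (A : List (List Int)) (n : Int) (h1 : 1 ≤ n) :
    count_9_cycles_dp_alt A n = PySem.Int.floordiv
      (((List.range n.toNat).drop 1).foldl
        (fun s v => if get2 A v 0 ≠ 0 then s + F A n.toNat (2 ^ n.toNat - 1) v else s) 0) n := by
  unfold count_9_cycles_dp_alt
  dsimp only
  congr 1
  apply pv_B_fold
  intro mask v x hx
  rw [PySem.Dict.get?_empty] at hx
  cases hx

-- ===== VERDICT (by name: the statement is the Claim_ definition above) =====
theorem count_9_cycles_dp_spec : Claim_equal_count_9_cycles_dp := by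
  intro A n _ hPre
  unfold Spec_count_9_cycles_dp
  rw [pv_A_eq A n hPre.1, pv_B_eq A n hPre.1]
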